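-- pv_equiv track=rewrite | github.com/mj064/AI_Network_troubleshoot | src/backend/utils/utils.py | _determine_root_cause
-- ===== SOURCE A (Python) =====
-- from typing import Dict, List, Tuple
--
-- def _determine_root_cause(alerts: List[str]) -> str:
--     """Determine likely root cause from alert pattern"""
--     if any("CPU" in a or "MEMORY" in a for a in alerts):
--         return "Resource exhaustion (CPU/Memory)"
--     elif any("INTERFACE_DOWN" in a or "PACKET_LOSS" in a for a in alerts):
--         return "Physical link failure or degradation"
--     elif any("BGP" in a or "OSPF" in a or "ROUTE" in a for a in alerts):
--         return "Routing protocol instability"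
--     elif any("DOWN" in a or "UNREACHABLE" in a for a in alerts):
--         return "Device or service availability issue"
--     else:
--         return "Configuration or operational issue"
-- ===== SOURCE B (Python) =====
-- RULES = [
--     (("CPU", "MEMORY"), "Resource exhaustion (CPU/Memory)"),
--     (("INTERFACE_DOWN", "PACKET_LOSS"), "Physical link failure or degradation"),
--     (("BGP", "OSPF", "ROUTE"), "Routing protocol instability"),
--     (("DOWN", "UNREACHABLE"), "Device or service availability issue"),
-- ]
-- DEFAULT = "Configuration or operational issue"
--
--
-- def _rank(alert):
--     """Index of the first rule whose keywords hit this alert (len(RULES) if none)."""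
--     for i, (kws, _) in enumerate(RULES):
--         if any(kw in alert for kw in kws):
--             return i
--     return len(RULES)
--
--
-- def _determine_root_cause(alerts):
--     """Determine likely root cause from alert pattern"""
--     best = len(RULES)
--     for a in alerts:
--         best = min(best, _rank(a))
--     return RULES[best][1] if best < len(RULES) else DEFAULT
-- ===== Notes on version B (the rewrite author's own statement) =====
-- stated objective: alternative
-- what changed: Instead of four separate elif scans over the whole alert list, B makes a single pass over the alerts, computing for each alert the index of the first matching rule in an ordered rules table and keeping the minimum index, then looks the result string up in the table.
import Mathlib
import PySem

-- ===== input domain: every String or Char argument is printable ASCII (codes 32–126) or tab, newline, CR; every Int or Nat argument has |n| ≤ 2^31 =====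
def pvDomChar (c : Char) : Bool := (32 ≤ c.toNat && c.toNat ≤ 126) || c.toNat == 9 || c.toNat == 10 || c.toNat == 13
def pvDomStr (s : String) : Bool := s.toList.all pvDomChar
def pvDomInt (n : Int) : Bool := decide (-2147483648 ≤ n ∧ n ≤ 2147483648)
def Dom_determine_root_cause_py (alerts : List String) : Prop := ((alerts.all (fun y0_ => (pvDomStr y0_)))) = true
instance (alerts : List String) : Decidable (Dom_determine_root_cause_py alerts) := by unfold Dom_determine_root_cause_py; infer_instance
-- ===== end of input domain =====

-- B replaces A's four elif scans over the alert list by ONE pass keeping the minimum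
-- index of the first matching rule of an ordered rules table (alternative decomposition).

-- ===== PORT A =====
def determine_root_cause_py (alerts : List String) : String :=
  if alerts.any (fun a => PySem.Str.isIn "CPU" a || PySem.Str.isIn "MEMORY" a) then
    "Resource exhaustion (CPU/Memory)"
  else if alerts.any (fun a => PySem.Str.isIn "INTERFACE_DOWN" a || PySem.Str.isIn "PACKET_LOSS" a) then
    "Physical link failure or degradation"
  else if alerts.any (fun a => PySem.Str.isIn "BGP" a || PySem.Str.isIn "OSPF" a || PySem.Str.isIn "ROUTE" a) then
    "Routing protocol instability"
  else if alerts.any (fun a => PySem.Str.isIn "DOWN" a || PySem.Str.isIn "UNREACHABLE" a) then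
    "Device or service availability issue"
  else
    "Configuration or operational issue"

-- ===== PORT B =====
def pvRules : List (List String × String) :=
  [ (["CPU", "MEMORY"], "Resource exhaustion (CPU/Memory)"),
    (["INTERFACE_DOWN", "PACKET_LOSS"], "Physical link failure or degradation"),
    (["BGP", "OSPF", "ROUTE"], "Routing protocol instability"),
    (["DOWN", "UNREACHABLE"], "Device or service availability issue") ]

-- _rank's loop over enumerate(RULES), carrying the running index i
def pvRankAux (i : Nat) (rules : List (List String × String)) (alert : String) : Nat :=
  match rules with
  | [] => i
  | (kws, _) :: rest =>
      if kws.any (fun kw => PySem.Str.isIn kw alert) then i else pvRankAux (i + 1) rest alert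

def pvRank (alert : String) : Nat := pvRankAux 0 pvRules alert

def determine_root_cause_py_alt (alerts : List String) : String :=
  let best := alerts.foldl (fun b a => min b (pvRank a)) pvRules.length
  if best < pvRules.length then (pvRules.getD best ([], "")).2
  else "Configuration or operational issue"

-- ===== PRECONDITION & SPEC =====
def Spec_determine_root_cause_py (alerts : List String) (out : String) : Prop := out = determine_root_cause_py_alt alerts
instance (alerts : List String) (out : String) : Decidable (Spec_determine_root_cause_py alerts out) := by unfold Spec_determine_root_cause_py; infer_instance

-- ===== CLAIM (what is proved, stated in full; the proofs are below) =====
def Claim_equal_determine_root_cause_py : Prop := ∀ (alerts : List String), Dom_determine_root_cause_py alerts → Spec_determine_root_cause_py alerts (determine_root_cause_py alerts)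

-- ===== LEMMAS AND PROOFS =====

lemma pvRank_eq (a : String) :
    pvRank a =
      (if PySem.Str.isIn "CPU" a || PySem.Str.isIn "MEMORY" a then 0
       else if PySem.Str.isIn "INTERFACE_DOWN" a || PySem.Str.isIn "PACKET_LOSS" a then 1
       else if PySem.Str.isIn "BGP" a || PySem.Str.isIn "OSPF" a || PySem.Str.isIn "ROUTE" a then 2
       else if PySem.Str.isIn "DOWN" a || PySem.Str.isIn "UNREACHABLE" a then 3
       else 4) := by
  simp [pvRank, pvRules, pvRankAux, List.any, Bool.or_assoc]

lemma pvRank_le (a : String) : pvRank a ≤ 4 := by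
  rw [pvRank_eq]; split_ifs <;> omega

lemma fold_min_gen (l : List String) :
    ∀ b : Nat, b ≤ 4 →
      l.foldl (fun b a => min b (pvRank a)) b = min b (l.foldl (fun b a => min b (pvRank a)) 4) := by
  induction l with
  | nil => intro b hb; simp; omega
  | cons a l ih =>
      intro b hb
      have hr := pvRank_le a
      simp only [List.foldl_cons]
      rw [ih (min b (pvRank a)) (by omega), ih (min 4 (pvRank a)) (by omega)]
      omega

set_option maxHeartbeats 2000000 in
lemma fold_min_char (l : List String) :
    l.foldl (fun b a => min b (pvRank a)) 4 =
      (if l.any (fun a => PySem.Str.isIn "CPU" a || PySem.Str.isIn "MEMORY" a) then 0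
       else if l.any (fun a => PySem.Str.isIn "INTERFACE_DOWN" a || PySem.Str.isIn "PACKET_LOSS" a) then 1
       else if l.any (fun a => PySem.Str.isIn "BGP" a || PySem.Str.isIn "OSPF" a || PySem.Str.isIn "ROUTE" a) then 2
       else if l.any (fun a => PySem.Str.isIn "DOWN" a || PySem.Str.isIn "UNREACHABLE" a) then 3
       else 4) := by
  induction l with
  | nil => simp
  | cons a l ih =>
      simp only [List.foldl_cons, List.any_cons]
      rw [fold_min_gen l (min 4 (pvRank a)) (by have := pvRank_le a; omega), ih, pvRank_eq]
      by_cases h0 : (PySem.Str.isIn "CPU" a || PySem.Str.isIn "MEMORY" a) = true <;>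
      by_cases h1 : (PySem.Str.isIn "INTERFACE_DOWN" a || PySem.Str.isIn "PACKET_LOSS" a) = true <;>
      by_cases h2 : (PySem.Str.isIn "BGP" a || PySem.Str.isIn "OSPF" a || PySem.Str.isIn "ROUTE" a) = true <;>
      by_cases h3 : (PySem.Str.isIn "DOWN" a || PySem.Str.isIn "UNREACHABLE" a) = true <;>
        simp only [Bool.not_eq_true] at h0 h1 h2 h3 <;>
      by_cases g0 : (l.any fun a => PySem.Str.isIn "CPU" a || PySem.Str.isIn "MEMORY" a) = true <;>
      by_cases g1 : (l.any fun a => PySem.Str.isIn "INTERFACE_DOWN" a || PySem.Str.isIn "PACKET_LOSS" a) = true <;>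
      by_cases g2 : (l.any fun a => PySem.Str.isIn "BGP" a || PySem.Str.isIn "OSPF" a || PySem.Str.isIn "ROUTE" a) = true <;>
      by_cases g3 : (l.any fun a => PySem.Str.isIn "DOWN" a || PySem.Str.isIn "UNREACHABLE" a) = true <;>
        simp only [Bool.not_eq_true] at g0 g1 g2 g3 <;>
        simp only [h0, h1, h2, h3, g0, g1, g2, g3] <;> norm_num

-- ===== VERDICT (by name: the statement is the Claim_ definition above) =====
theorem determine_root_cause_py_spec : Claim_equal_determine_root_cause_py := by
  intro alerts _
  unfold Spec_determine_root_cause_py determine_root_cause_py determine_root_cause_py_alt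
  simp only [show pvRules.length = 4 from rfl]
  rw [fold_min_char]
  split_ifs <;> first | rfl | omega
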